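-- pv_equiv track=rewrite | github.com/hippie-cycling/CBFT | Gromark_transposition.py | validate_keyword
-- ===== SOURCE A (Python) =====
-- from typing import List, Tuple, Dict
--
-- def create_keyed_alphabet(keyword: str, alphabet: str = "ABCDEFGHIJKLMNOPQRSTUVWXYZ") -> str:
--     # Use the provided alphabet
--     keyword = ''.join(dict.fromkeys(keyword.upper()))
--     remaining = ''.join(c for c in alphabet if c not in keyword)
--     base = keyword + remaining
--
--     cols = len(keyword)
--     rows = (len(base) + cols - 1) // cols
--     block = [['' for _ in range(cols)] for _ in range(rows)]
--
--     idx = 0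
--     for i in range(rows):
--         for j in range(cols):
--             if idx < len(base):
--                 block[i][j] = base[idx]
--                 idx += 1
--
--     sorted_chars = sorted(keyword)
--     order = []
--     for char in keyword:
--         order.append(sorted_chars.index(char) + 1)
--         sorted_chars[sorted_chars.index(char)] = None
--
--     col_order = [p[0] for p in sorted(enumerate(order), key=lambda x: x[1])]
--
--     return ''.join(
--         block[row][col]
--         for col in col_order
--         for row in range(rows)
--         if row < len(block) and block[row][col]
--     )
--
-- def validate_keyword(keyword: str, known_segments: List[Tuple], alphabet: str = "ABCDEFGHIJKLMNOPQRSTUVWXYZ") -> bool: # Add alphabet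
--     try:
--         mixed_alphabet = create_keyed_alphabet(keyword, alphabet) # Pass alphabet
--
--         for _, cipher_segment, plain_segment in known_segments:
--             for c, p in zip(cipher_segment, plain_segment):
--                 mixed_pos = mixed_alphabet.index(c)
--                 straight_letter = alphabet[mixed_pos] # Use provided alphabet
--                 plain_pos = alphabet.index(p.upper()) # Use provided alphabet
--                 straight_pos = alphabet.index(straight_letter) # Use provided alphabet
--
--                 if (straight_pos - plain_pos) % len(alphabet) > 9: # Use len(alphabet) for modulo
--                     return False
--
--         return True
--
--     except Exception:
--         return False
-- ===== SOURCE B (Python) =====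
-- def validate_keyword(keyword, known_segments, alphabet="ABCDEFGHIJKLMNOPQRSTUVWXYZ"):
--     # Inverse-permutation approach: the transposed (keyed) alphabet is never built.
--     # For a base index i the position of base[i] in the keyed alphabet is computed
--     # arithmetically: offset of its column (sum of the heights of the columns whose
--     # keyword letter is smaller) plus its row; a char's position is the minimum
--     # over its occurrences.  Explicit checks replace A's try/except.
--     kw = ''.join(dict.fromkeys(keyword.upper()))
--     k = len(kw)
--     if k == 0:
--         return False
--     base = kw + ''.join(ch for ch in alphabet if ch not in kw)
--     L = len(base)
--     n = len(alphabet)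
--     heights = [(L - j + k - 1) // k for j in range(k)]
--     offs = [sum(heights[j2] for j2 in range(k) if kw[j2] < kw[j]) for j in range(k)]
--     for _, cseg, pseg in known_segments:
--         for c, p in zip(cseg, pseg):
--             occ = [offs[i % k] + i // k for i in range(L) if base[i] == c]
--             if not occ:
--                 return False
--             mp = min(occ)
--             if mp >= n:
--                 return False
--             pu = p.upper()
--             if pu not in alphabet:
--                 return False
--             if (alphabet.index(alphabet[mp]) - alphabet.index(pu)) % n > 9:
--                 return False
--     return True
-- ===== Notes on version B (the rewrite author's own statement) =====
-- stated objective: alternative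
-- what changed: B never constructs the transposed keyed alphabet: it computes each character's position in it arithmetically (column offset = sum of heights of columns with a smaller keyword letter, plus row; a char's position is the min over its occurrences in the base string), replacing A's 2D grid fill, rank/argsort machinery, string build and .index search, and replaces A's try/except flow by explicit checks.
import Mathlib
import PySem

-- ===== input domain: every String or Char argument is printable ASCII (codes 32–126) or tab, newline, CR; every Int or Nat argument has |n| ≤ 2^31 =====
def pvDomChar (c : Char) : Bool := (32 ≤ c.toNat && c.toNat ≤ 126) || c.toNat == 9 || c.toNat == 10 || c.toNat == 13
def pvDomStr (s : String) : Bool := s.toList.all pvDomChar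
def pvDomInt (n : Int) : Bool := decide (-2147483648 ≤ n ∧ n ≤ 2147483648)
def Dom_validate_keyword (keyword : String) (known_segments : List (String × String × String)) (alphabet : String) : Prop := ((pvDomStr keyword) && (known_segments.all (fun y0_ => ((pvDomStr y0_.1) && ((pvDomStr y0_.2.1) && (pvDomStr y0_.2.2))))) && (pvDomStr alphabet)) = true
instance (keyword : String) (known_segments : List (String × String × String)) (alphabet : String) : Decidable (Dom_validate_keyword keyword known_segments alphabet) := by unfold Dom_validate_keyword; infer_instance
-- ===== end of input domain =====

-- B computes each character's keyed-alphabet position arithmetically (column offset +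
-- row, minimum over occurrences) instead of A's 2D grid / rank-argsort / transposed
-- string / .index search, and replaces A's try/except flow by explicit checks.

-- ===== PORT A =====

-- the nested fill loop: block[i][j] = base[idx] while idx < len(base), else '' (here: none)
def blockFillA (base : List Char) (cols rows : Nat) : List (List (Option Char)) :=
  ((List.range rows).foldl
    (fun (st : List (List (Option Char)) × Nat) _i =>
      let row := (List.range cols).foldl
        (fun (st2 : List (Option Char) × Nat) _j =>
          if st2.2 < base.length then (st2.1 ++ [base[st2.2]?], st2.2 + 1)
          else (st2.1 ++ [none], st2.2))
        ([], st.2)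
      (st.1 ++ [row.1], row.2))
    ([], 0)).1

-- the rank loop: order.append(sorted_chars.index(char)+1); sorted_chars[...] = None
-- (none = a raised ValueError from .index; never reached, kw is deduplicated)
def orderLoopA : List Char → List (Option Char) → Option (List Int)
  | [], _ => some []
  | ch :: rest, sc =>
    match PySem.List.index? sc (some ch) with
    | none => none
    | some i =>
      match orderLoopA rest (sc.set i none) with
      | none => none
      | some tl => some (((i : Int) + 1) :: tl)

-- create_keyed_alphabet; none = an exception (ZeroDivisionError when the deduped
-- keyword is empty, ValueError from .index — the latter never fires)
def ckaA (keyword alpha : List Char) : Option (List Char) :=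
  let kw := PySem.List.dedup (PySem.Chars.upper keyword)
  let remaining := alpha.filter (fun c => !(kw.contains c))
  let base := kw ++ remaining
  let cols := kw.length
  if cols = 0 then none
  else
    let rows := (base.length + cols - 1) / cols  -- Python '//': operands ≥ 0, divisor > 0, so Nat '/' is exact
    let block := blockFillA base cols rows
    let sortedChars := PySem.List.sorted kw (fun c => c) false
    match orderLoopA kw (sortedChars.map some) with
    | none => none
    | some order =>
      let colOrder := (PySem.List.sorted (PySem.List.enumerate order 0) (fun x => x.2) false).map (fun p => p.1)
      some (colOrder.flatMap (fun col =>
        (List.range rows).filterMap (fun row =>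
          if row < block.length then
            -- block[row][col]: both indexes are in range here (col is an index of order, row < rows)
            match (PySem.List.pyGet? block (row : Int)).bind (fun r => PySem.List.pyGet? r col) with
            | some (some c) => some c
            | _ => none
          else none)))

-- the inner 'for c, p in zip(...)' loop; none = an exception (→ False overall)
def checkPairsA (mixed alpha : List Char) : List (Char × Char) → Option Bool
  | [] => some true
  | (c, p) :: rest =>
    match PySem.List.index? mixed c with
    | none => none                                   -- ValueError from .index
    | some mp =>
      match PySem.List.pyGet? alpha (mp : Int) with
      | none => none                                 -- IndexError from alphabet[mixed_pos]
      | some sl =>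
        -- p.upper(): one ASCII char stays one char (Dom is printable ASCII)
        match PySem.List.index? alpha (PySem.Chars.upperChar p) with
        | none => none                               -- ValueError from .index
        | some pp =>
          match PySem.List.index? alpha sl with
          | none => none
          | some sp =>
            if 9 < PySem.Int.mod ((sp : Int) - (pp : Int)) (alpha.length : Int) then some false
            else checkPairsA mixed alpha rest

def checkSegsA (mixed alpha : List Char) : List (String × String × String) → Option Bool
  | [] => some true
  | (_, cs, ps) :: rest =>
    match checkPairsA mixed alpha (cs.toList.zip ps.toList) with
    | none => none
    | some false => some false
    | some true => checkSegsA mixed alpha rest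

def validate_keyword (keyword : String) (known_segments : List (String × String × String)) (alphabet : String) : Bool :=
  match ckaA keyword.toList alphabet.toList with
  | none => false                                    -- the except branch
  | some mixed =>
    match checkSegsA mixed alphabet.toList known_segments with
    | none => false                                  -- the except branch
    | some b => b

-- ===== PORT B =====

-- per-pair check of Source B: the char's keyed-alphabet position is the minimum, over its
-- occurrences i in base, of column offset offs[i % k] plus row i // k
def checkPairsB (base : List Char) (k : Nat) (offs : List Nat) (alpha : List Char) : List (Char × Char) → Bool
  | [] => true
  | (c, p) :: rest =>
    let occ := (List.range base.length).filterMap (fun i =>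
      if base.getD i ' ' = c then some (offs.getD (i % k) 0 + i / k) else none)
    match PySem.List.min? occ (fun x => x) with
    | none => false                                  -- 'if not occ'
    | some mp =>
      if alpha.length ≤ mp then false
      else
        let pu := PySem.Chars.upperChar p            -- p.upper(): one ASCII char (Dom)
        if !(alpha.contains pu) then false
        else if 9 < PySem.Int.mod (((PySem.List.index? alpha (alpha.getD mp ' ')).getD 0 : Int) - ((PySem.List.index? alpha pu).getD 0 : Int)) (alpha.length : Int) then false
        else checkPairsB base k offs alpha rest

def checkSegsB (base : List Char) (k : Nat) (offs : List Nat) (alpha : List Char) : List (String × String × String) → Bool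
  | [] => true
  | (_, cs, ps) :: rest =>
    if checkPairsB base k offs alpha (cs.toList.zip ps.toList) then checkSegsB base k offs alpha rest
    else false

def validate_keyword_alt (keyword : String) (known_segments : List (String × String × String)) (alphabet : String) : Bool :=
  let kw := PySem.List.dedup (PySem.Chars.upper keyword.toList)
  let k := kw.length
  if k = 0 then false
  else
    let alpha := alphabet.toList
    let base := kw ++ alpha.filter (fun c => !(kw.contains c))
    let L := base.length
    let heights := (List.range k).map (fun j => (L - j + k - 1) / k)
    let offs := (List.range k).map (fun j =>
      (((List.range k).filter (fun j2 => kw.getD j2 ' ' < kw.getD j ' ')).map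
        (fun j2 => heights.getD j2 0)).sum)
    checkSegsB base k offs alpha known_segments

-- ===== PRECONDITION & SPEC =====
def Spec_validate_keyword (keyword : String) (known_segments : List (String × String × String)) (alphabet : String) (out : Bool) : Prop := out = validate_keyword_alt keyword known_segments alphabet
instance (keyword : String) (known_segments : List (String × String × String)) (alphabet : String) (out : Bool) : Decidable (Spec_validate_keyword keyword known_segments alphabet out) := by unfold Spec_validate_keyword; infer_instance

-- ===== CLAIM (what is proved, stated in full; the proofs are below) =====
def Claim_equal_validate_keyword : Prop := ∀ (keyword : String) (known_segments : List (String × String × String)) (alphabet : String), Dom_validate_keyword keyword known_segments alphabet → Spec_validate_keyword keyword known_segments alphabet (validate_keyword keyword known_segments alphabet)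

-- ===== LEMMAS AND PROOFS =====

-- the inner fill loop writes base[s+j] into column j while the running index is below len(base)
theorem fill_inner (base : List Char) (m s : Nat) (acc : List (Option Char)) :
    (List.range m).foldl
      (fun (st2 : List (Option Char) × Nat) _ =>
        if st2.2 < base.length then (st2.1 ++ [base[st2.2]?], st2.2 + 1) else (st2.1 ++ [none], st2.2))
      (acc, min base.length s)
    = (acc ++ (List.range m).map (fun j => if s + j < base.length then base[s + j]? else none),
       min base.length (s + m)) := by
  induction m with
  | zero => simp
  | succ m ih =>
    rw [List.range_succ, List.foldl_append, ih, List.map_append]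
    simp only [List.foldl_cons, List.foldl_nil, List.map_cons, List.map_nil]
    by_cases h : s + m < base.length
    · have h1 : min base.length (s + m) = s + m := by omega
      have h3 : min base.length (s + (m + 1)) = s + m + 1 := by omega
      simp [h1, h3, h, List.append_assoc]
    · have h1 : min base.length (s + m) = base.length := by omega
      have h3 : min base.length (s + (m + 1)) = base.length := by omega
      simp [h1, h3, h, List.append_assoc]

-- the outer fill loop emits the rows one after the other
theorem fill_outer (base : List Char) (cols m i : Nat) (acc : List (List (Option Char))) :
    (List.range m).foldl
      (fun (st : List (List (Option Char)) × Nat) _ =>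
        let row := (List.range cols).foldl
          (fun (st2 : List (Option Char) × Nat) _ =>
            if st2.2 < base.length then (st2.1 ++ [base[st2.2]?], st2.2 + 1) else (st2.1 ++ [none], st2.2))
          ([], st.2)
        (st.1 ++ [row.1], row.2))
      (acc, min base.length (i * cols))
    = (acc ++ (List.range m).map (fun r =>
        (List.range cols).map (fun j =>
          if (i + r) * cols + j < base.length then base[(i + r) * cols + j]? else none)),
       min base.length ((i + m) * cols)) := by
  induction m with
  | zero => simp
  | succ m ih =>
    rw [List.range_succ, List.foldl_append, ih, List.map_append]
    simp only [List.foldl_cons, List.foldl_nil, List.map_cons, List.map_nil]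
    rw [fill_inner base cols ((i + m) * cols) []]
    have h3 : (i + m) * cols + cols = (i + (m + 1)) * cols := by ring
    simp [List.append_assoc, h3]

theorem blockFillA_eq (base : List Char) (cols rows : Nat) :
    blockFillA base cols rows = (List.range rows).map (fun r =>
      (List.range cols).map (fun j =>
        if r * cols + j < base.length then base[r * cols + j]? else none)) := by
  unfold blockFillA
  have h0 : (([], 0) : List (List (Option Char)) × Nat) = ([], min base.length (0 * cols)) := by simp
  rw [h0, fill_outer base cols rows 0 []]
  simp

-- .index on the masked sorted list finds the first (only) occurrence of the char
theorem index_map_mask (P : List Char) (S : List Char) (ch : Char) (hm : ch ∈ S) (hP : ch ∉ P) :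
    PySem.List.index? (S.map (fun x => if P.contains x then none else some x)) (some ch)
      = some (List.idxOf ch S) := by
  induction S with
  | nil => cases hm
  | cons s t ih =>
    by_cases hs : s = ch
    · subst hs
      have : ¬ P.contains s := by simpa using hP
      simp only [List.map_cons, if_neg this]
      rw [PySem.List.index?_cons_self, List.idxOf_cons_self]
    · have hne : (if P.contains s then none else some s) ≠ some ch := by
        split <;> simp [hs]
      have hmt : ch ∈ t := by cases hm with | head => exact absurd rfl hs | tail _ h => exact h
      simp only [List.map_cons]
      rw [PySem.List.index?_cons_of_ne _ hne, ih hmt, List.idxOf_cons_ne _ (fun h => hs h)]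
      rfl

-- blanking out the found position extends the mask by that char (S has no duplicates)
theorem set_map_mask (P : List Char) (S : List Char) (ch : Char) (hnd : S.Nodup) (hm : ch ∈ S) :
    (S.map (fun x => if P.contains x then none else some x)).set (List.idxOf ch S) none
      = S.map (fun x => if (ch :: P).contains x then none else some x) := by
  induction S with
  | nil => cases hm
  | cons s t ih =>
    have hndt : t.Nodup := hnd.of_cons
    by_cases hs : s = ch
    · subst hs
      have hst : s ∉ t := (List.nodup_cons.mp hnd).1
      simp only [List.map_cons, List.idxOf_cons_self, List.set_cons_zero]
      have h1 : (if (s :: P).contains s then none else some s) = (none : Option Char) := by simp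
      rw [h1]
      have h2 : t.map (fun x => if P.contains x then none else some x)
          = t.map (fun x => if (s :: P).contains x then none else some x) := by
        apply List.map_congr_left
        intro x hx
        have hxs : x ≠ s := fun h => hst (h ▸ hx)
        simp [hxs]
      rw [h2]
    · have hmt : ch ∈ t := by cases hm with | head => exact absurd rfl hs | tail _ h => exact h
      simp only [List.map_cons, List.idxOf_cons_ne _ (fun h => hs h)]
      rw [List.set_cons_succ]
      have h1 : (if (ch :: P).contains s then none else some s)
          = (if P.contains s then none else some s) := by
        have hcs : s ≠ ch := hs
        simp [hcs]
      rw [ih hndt hmt, h1]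

-- the rank loop returns 1 + position in the sorted keyword, for each keyword char
theorem orderLoop_mask (S : List Char) : ∀ (ks P : List Char), ks.Nodup → (∀ c ∈ ks, c ∈ S) →
    (∀ c ∈ ks, c ∉ P) → S.Nodup →
    orderLoopA ks (S.map (fun x => if P.contains x then none else some x))
      = some (ks.map (fun c => ((List.idxOf c S : Nat) : Int) + 1)) := by
  intro ks
  induction ks with
  | nil => intro P _ _ _ _; rfl
  | cons ch rest ih =>
    intro P hnd hmem hP hS
    rw [orderLoopA]
    have h1 := index_map_mask P S ch (hmem ch (by simp)) (hP ch (by simp))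
    have h2 := set_map_mask P S ch hS (hmem ch (by simp))
    have h3 := ih (ch :: P) hnd.of_cons (fun c hc => hmem c (List.mem_cons_of_mem _ hc))
      (fun c hc => by
        have hne : c ≠ ch := fun h => (List.nodup_cons.mp hnd).1 (h ▸ hc)
        have hcP : c ∉ P := hP c (List.mem_cons_of_mem _ hc)
        simp [hne, hcP]) hS
    simp only [h1, h2, h3, List.map_cons]

-- in a sorted duplicate-free list, positions are ordered as the values are
theorem idxOf_lt_idxOf_sorted (S : List Char) (_hnd : S.Nodup)
    (hp : S.Pairwise (fun a b => a ≤ b)) (x y : Char) (hx : x ∈ S) (hy : y ∈ S) (hxy : x < y) :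
    List.idxOf x S < List.idxOf y S := by
  have hix : List.idxOf x S < S.length := List.idxOf_lt_length_iff.mpr hx
  have hiy : List.idxOf y S < S.length := List.idxOf_lt_length_iff.mpr hy
  by_contra hcon
  rcases Nat.lt_or_ge (List.idxOf y S) (List.idxOf x S) with h | h
  · have := List.pairwise_iff_getElem.mp hp _ _ hiy hix h
    rw [List.getElem_idxOf hiy, List.getElem_idxOf hix] at this
    exact absurd hxy (not_lt.mpr this)
  · have hxx : S[List.idxOf x S] = x := List.getElem_idxOf hix
    have hyy : S[List.idxOf y S] = y := List.getElem_idxOf hiy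
    have hxyeq : x = y := by
      rw [← hxx, ← hyy]
      congr 1
      omega
    subst hxyeq
    exact lt_irrefl x hxy

-- A's rank-then-argsort column order is the argsort of the (distinct) keyword letters
theorem colOrder_eq (kw : List Char) (hnd : kw.Nodup) :
    (PySem.List.sorted
        (PySem.List.enumerate (kw.map (fun c =>
          ((List.idxOf c (PySem.List.sorted kw (fun c => c) false) : Nat) : Int) + 1)) 0)
        (fun x => x.2) false).map (fun p => p.1)
      = (PySem.List.sorted (List.range kw.length) (fun j => kw.getD j ' ') false).map
          (fun (j : Nat) => (j : Int)) := by
  set S := PySem.List.sorted kw (fun c => c) false with hSdef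
  set rk : Char → Int := fun c => ((List.idxOf c S : Nat) : Int) + 1 with hrk
  set order : List Int := kw.map rk with horder
  set CB := PySem.List.sorted (List.range kw.length) (fun j => kw.getD j ' ') false with hCB
  set g : Nat → Int × Int := fun j => ((j : Int), rk (kw.getD j ' ')) with hg
  have hSnd : S.Nodup := (PySem.List.sorted_perm kw (fun c => c) false).symm.nodup hnd
  have hSp : S.Pairwise (fun a b => a ≤ b) := PySem.List.sorted_pairwise kw (fun c => c)
  -- enumerate(order) written as a map over range
  have henum : PySem.List.enumerate order 0 = (List.range kw.length).map g := by
    rw [PySem.List.enumerate_eq_map_pyRange order 0]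
    have hlen : PySem.List.len order = ((kw.length : Nat) : Int) := by
      simp [PySem.List.len, horder]
    rw [hlen, PySem.List.pyRange_zero_natCast, List.map_map]
    apply List.map_congr_left
    intro k hk
    have hk' : k < kw.length := List.mem_range.mp hk
    have hko : k < order.length := by simp [horder, hk']
    simp only [Function.comp, PySem.List.pyGetD_natCast, hg]
    rw [List.getD_eq_getElem order 0 hko, List.getD_eq_getElem kw ' ' hk']
    simp [horder, rk]
  have hmemCB : ∀ j ∈ CB, j < kw.length := fun j hj =>
    List.mem_range.mp ((PySem.List.mem_sorted _ _ _ j).mp hj)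
  have hCBnd : CB.Nodup :=
    (PySem.List.sorted_perm (List.range kw.length) _ false).symm.nodup (List.nodup_range)
  have hCBle : CB.Pairwise (fun a b => kw.getD a ' ' ≤ kw.getD b ' ') :=
    PySem.List.sorted_pairwise _ _
  have hCBlt : CB.Pairwise (fun a b => kw.getD a ' ' < kw.getD b ' ') := by
    refine (hCBle.and hCBnd).imp_of_mem ?_
    intro a b ha hb hab
    rcases hab with ⟨hle, hne⟩
    rcases lt_or_eq_of_le hle with h | h
    · exact h
    · exfalso
      have ha' := hmemCB a ha
      have hb' := hmemCB b hb
      rw [List.getD_eq_getElem kw ' ' ha', List.getD_eq_getElem kw ' ' hb'] at h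
      exact hne ((hnd.getElem_inj_iff).mp h)
  have hsorted : PySem.List.sorted (PySem.List.enumerate order 0) (fun x => x.2) false
      = CB.map g := by
    apply PySem.List.sorted_eq_of_perm_of_pairwise_lt
    · rw [henum]
      exact (PySem.List.sorted_perm (List.range kw.length) _ false).map g
    · rw [List.pairwise_map]
      refine hCBlt.imp_of_mem ?_
      intro a b ha hb hab
      have ha' := hmemCB a ha
      have hb' := hmemCB b hb
      have hma : kw.getD a ' ' ∈ S := by
        rw [PySem.List.mem_sorted, List.getD_eq_getElem kw ' ' ha']
        exact List.getElem_mem ha'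
      have hmb : kw.getD b ' ' ∈ S := by
        rw [PySem.List.mem_sorted, List.getD_eq_getElem kw ' ' hb']
        exact List.getElem_mem hb'
      have := idxOf_lt_idxOf_sorted S hSnd hSp _ _ hma hmb hab
      simp only [hg, hrk]
      omega
  rw [hsorted, List.map_map]
  apply List.map_congr_left
  intro j _
  simp [hg]

theorem cka_eq : ∀ (keyword alpha : List Char),
    ckaA keyword alpha =
      (let kw := PySem.List.dedup (PySem.Chars.upper keyword)
       let cols := kw.length
       if cols = 0 then none
       else
         let base := kw ++ alpha.filter (fun c => !(kw.contains c))
         let rows := (base.length + cols - 1) / cols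
         some ((PySem.List.sorted (List.range cols) (fun j => kw.getD j ' ') false).flatMap
           (fun j => (List.range rows).filterMap (fun r =>
             if r * cols + j < base.length then base[r * cols + j]? else none)))) := by
  intro keyword alpha
  rw [ckaA]
  set kw := PySem.List.dedup (PySem.Chars.upper keyword) with hkw
  have hnd : kw.Nodup := PySem.List.nodup_dedup _
  by_cases h0 : kw.length = 0
  · simp [h0]
  · simp only [if_neg h0]
    set S := PySem.List.sorted kw (fun c => c) false with hS
    have hSnd : S.Nodup := (PySem.List.sorted_perm kw (fun c => c) false).symm.nodup hnd
    set base := kw ++ alpha.filter (fun c => !(kw.contains c)) with hbase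
    set cols := kw.length with hcols
    set rows := (base.length + cols - 1) / cols with hrows
    -- the rank loop succeeds and yields the ranks
    have hmask : S.map some = S.map (fun x => if ([] : List Char).contains x then none else some x) := by
      apply List.map_congr_left; intro x _; simp
    have horder : orderLoopA kw (S.map some)
        = some (kw.map (fun c => ((List.idxOf c S : Nat) : Int) + 1)) := by
      rw [hmask]
      exact orderLoop_mask S kw [] hnd
        (fun c hc => (PySem.List.mem_sorted _ _ _ c).mpr hc) (by simp) hSnd
    rw [horder]
    simp only []
    have hco := colOrder_eq kw hnd
    rw [← hS] at hco
    rw [hco]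
    rw [List.flatMap_map]
    congr 1
    apply List.flatMap_congr
    intro j hj
    have hjlt : j < cols := List.mem_range.mp ((PySem.List.mem_sorted _ _ _ j).mp hj)
    apply List.filterMap_congr
    intro row hrow
    have hrlt : row < rows := List.mem_range.mp hrow
    rw [blockFillA_eq]
    have hblen : ((List.range rows).map (fun r => (List.range cols).map (fun j =>
        if r * cols + j < base.length then base[r * cols + j]? else none))).length = rows := by
      simp
    rw [if_pos (by rw [hblen]; exact hrlt)]
    have hrow? : ((List.range rows).map (fun r => (List.range cols).map (fun j =>
        if r * cols + j < base.length then base[r * cols + j]? else none)))[row]?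
        = some ((List.range cols).map (fun j =>
          if row * cols + j < base.length then base[row * cols + j]? else none)) := by
      rw [List.getElem?_eq_getElem (by simpa using hrlt)]
      simp
    rw [PySem.List.pyGet?_natCast, hrow?]
    simp only [Option.bind_some]
    have hcell : ((List.range cols).map (fun j =>
        if row * cols + j < base.length then base[row * cols + j]? else none))[j]?
        = some (if row * cols + j < base.length then base[row * cols + j]? else none) := by
      rw [List.getElem?_eq_getElem (by simpa using hjlt)]
      simp
    rw [PySem.List.pyGet?_natCast, hcell]
    by_cases hc : row * cols + j < base.length
    · rw [if_pos hc, List.getElem?_eq_getElem hc]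
    · rw [if_neg hc]


-- ===== B-side machinery: the arithmetic position formula equals .index on the transposed string =====

def hgt (L k j : Nat) : Nat := (L - j + k - 1) / k

def posInP (h : Nat → Nat) : List Nat → Nat → Nat
  | [], _ => 0
  | x :: t, j => if j = x then 0 else h x + posInP h t j

theorem lt_hgt_iff (L k j r : Nat) (hk : 0 < k) (hj : j ≤ L) : r < hgt L k j ↔ r * k + j < L := by
  unfold hgt
  have h1 : r < (L - j + k - 1) / k ↔ r + 1 ≤ (L - j + k - 1) / k := by omega
  rw [h1, Nat.le_div_iff_mul_le hk]
  have h2 : (r + 1) * k = r * k + k := by ring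
  omega

theorem index?_append_of_not_mem {α : Type} [BEq α] [LawfulBEq α] (xs ys : List α) (c : α)
    (h : c ∉ xs) :
    PySem.List.index? (xs ++ ys) c = (PySem.List.index? ys c).map (· + xs.length) := by
  induction xs with
  | nil =>
    rw [List.nil_append, List.length_nil]
    cases PySem.List.index? ys c
    · simp
    · simp
  | cons x t ih =>
    have hx : x ≠ c := fun he => h (he ▸ List.mem_cons_self)
    rw [List.cons_append, PySem.List.index?_cons_of_ne _ hx,
      ih (fun ht => h (List.mem_cons_of_mem _ ht))]
    cases PySem.List.index? ys c
    · simp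
    · simp
      omega

theorem min?_id_eq_some (l : List Nat) (m : Nat) (hm : m ∈ l) (hmin : ∀ y ∈ l, m ≤ y) :
    PySem.List.min? l (fun x => x) = some m := by
  cases h : PySem.List.min? l (fun x => x) with
  | none =>
    rw [PySem.List.min?_eq_none_iff] at h
    subst h; cases hm
  | some x =>
    have hx := PySem.List.min?_mem h
    have h1 : x ≤ m := PySem.List.min?_isMin h m hm
    have h2 : m ≤ x := hmin x hx
    rw [le_antisymm h1 h2]

theorem colStr_eq (base : List Char) (k j : Nat) (hk : 0 < k) (hj : j < k) (hkL : k ≤ base.length) :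
    (List.range ((base.length + k - 1) / k)).filterMap (fun r =>
        if r * k + j < base.length then base[r * k + j]? else none)
      = (List.range (hgt base.length k j)).map (fun r => base.getD (r * k + j) ' ') := by
  set L := base.length with hL
  have hjL : j ≤ L := le_trans (le_of_lt hj) hkL
  have hle : hgt L k j ≤ (L + k - 1) / k := Nat.div_le_div_right (by omega)
  obtain ⟨d, hd⟩ : ∃ d, (L + k - 1) / k = hgt L k j + d := ⟨_, (Nat.add_sub_cancel' hle).symm⟩
  rw [hd, List.range_add, List.filterMap_append, List.filterMap_map]
  have h1 : (List.range (hgt L k j)).filterMap (fun r =>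
      if r * k + j < L then base[r * k + j]? else none)
      = (List.range (hgt L k j)).map (fun r => base.getD (r * k + j) ' ') := by
    rw [List.filterMap_congr (g := fun r => some (base.getD (r * k + j) ' ')) ?_]
    · rw [show (fun r => some (base.getD (r * k + j) ' ')) = some ∘ (fun r => base.getD (r * k + j) ' ') from rfl, List.filterMap_eq_map]
    · intro r hr
      have hrh : r < hgt L k j := List.mem_range.mp hr
      have hlt : r * k + j < L := (lt_hgt_iff L k j r hk hjL).mp hrh
      simp only [if_pos hlt, List.getElem?_eq_getElem hlt, List.getD_eq_getElem base ' ' hlt]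
  have h2 : (List.range d).filterMap ((fun r =>
      if r * k + j < L then base[r * k + j]? else none) ∘ (fun x => hgt L k j + x)) = [] := by
    rw [List.filterMap_eq_nil_iff]
    intro a _
    have : ¬ (hgt L k j + a) * k + j < L := by
      intro hlt
      have := (lt_hgt_iff L k j (hgt L k j + a) hk hjL).mpr hlt
      omega
    simp only [Function.comp, if_neg this]
  rw [h1, h2, List.append_nil]

theorem mem_occ (base : List Char) (k : Nat) (c : Char) (cs : List Nat) (m : Nat) :
    m ∈ (List.range base.length).filterMap (fun i =>
        if base.getD i ' ' = c ∧ i % k ∈ cs then some (posInP (hgt base.length k) cs (i % k) + i / k) else none)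
      ↔ ∃ i, i < base.length ∧ base.getD i ' ' = c ∧ i % k ∈ cs ∧ posInP (hgt base.length k) cs (i % k) + i / k = m := by
  simp only [List.mem_filterMap, List.mem_range, Option.ite_none_right_eq_some, Option.some.injEq]
  tauto

theorem main_ind (base : List Char) (k : Nat) (hk : 0 < k) (hkL : k ≤ base.length) (c : Char) :
    ∀ (cs : List Nat), cs.Nodup → (∀ j ∈ cs, j < k) →
    PySem.List.index? (cs.flatMap (fun j =>
        (List.range (hgt base.length k j)).map (fun r => base.getD (r * k + j) ' '))) c
      = PySem.List.min? ((List.range base.length).filterMap (fun i =>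
          if base.getD i ' ' = c ∧ i % k ∈ cs then
            some (posInP (hgt base.length k) cs (i % k) + i / k) else none)) (fun x => x) := by
  intro cs
  induction cs with
  | nil =>
    intro _ _
    have h1 : (List.range base.length).filterMap (fun i =>
        if base.getD i ' ' = c ∧ i % k ∈ ([] : List Nat) then
          some (posInP (hgt base.length k) [] (i % k) + i / k) else none) = [] := by
      rw [List.filterMap_eq_nil_iff]; intro a _; simp
    rw [h1]
    rfl
  | cons j t ih =>
    intro hnd hmem
    set L := base.length with hL
    set h : Nat → Nat := hgt L k with hh
    have hj : j < k := hmem j List.mem_cons_self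
    have hjL : j ≤ L := le_trans (le_of_lt hj) hkL
    have hjt : j ∉ t := (List.nodup_cons.mp hnd).1
    set g : Nat → Char := fun r => base.getD (r * k + j) ' ' with hg
    have hmodj : ∀ i, i % k = j → base.getD i ' ' = c → i < L → ∃ r, r < h j ∧ g r = c ∧ r = i / k := by
      intro i hmod hgd hiL
      have e1 : k * (i / k) + i % k = i := Nat.div_add_mod i k
      have e2 : i / k * k = k * (i / k) := Nat.mul_comm _ _
      have e3 : i / k * k + j = i := by omega
      refine ⟨i / k, ?_, ?_, rfl⟩
      · rw [hh, lt_hgt_iff L k j (i / k) hk hjL]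
        omega
      · show base.getD (i / k * k + j) ' ' = c
        rw [e3]
        exact hgd
    rw [List.flatMap_cons]
    by_cases hc : c ∈ (List.range (h j)).map g
    · -- the first column contains c: its first occurrence wins
      rw [PySem.List.index?_append_of_mem _ hc]
      cases hidx : PySem.List.index? ((List.range (h j)).map g) c with
      | none => exact absurd ((PySem.List.index?_eq_none_iff _ _).mp hidx) (by simpa using hc)
      | some m0 =>
        obtain ⟨hm0len, hm0get, hm0min⟩ := PySem.List.getElem_of_index?_eq_some hidx
        have hm0h : m0 < h j := by simpa using hm0len
        have hm0c : g m0 = c := by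
          have := hm0get
          simpa [List.getElem_map] using this
        have hm0first : ∀ r, r < m0 → g r ≠ c := by
          intro r hr
          have hrlen : r < ((List.range (h j)).map g).length := by
            simp; omega
          have := hm0min r hr
          simpa [List.getElem_map] using this
        symm
        apply min?_id_eq_some
        · rw [mem_occ]
          refine ⟨m0 * k + j, ?_, ?_, ?_, ?_⟩
          · rw [← hh] at *
            exact (lt_hgt_iff L k j m0 hk hjL).mp hm0h
          · rw [hg] at hm0c; exact hm0c
          · have : (m0 * k + j) % k = j := by
              rw [Nat.add_comm, Nat.add_mul_mod_self_right, Nat.mod_eq_of_lt hj]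
            rw [this]; exact List.mem_cons_self
          · have h1 : (m0 * k + j) % k = j := by
              rw [Nat.add_comm, Nat.add_mul_mod_self_right, Nat.mod_eq_of_lt hj]
            have h2 : (m0 * k + j) / k = m0 := by
              rw [Nat.add_comm, Nat.add_mul_div_right _ _ hk, Nat.div_eq_of_lt hj]
              omega
            rw [h1, h2, posInP, if_pos rfl]
            omega
        · intro y hy
          rw [mem_occ] at hy
          obtain ⟨i, hiL, hgd, hmemi, hval⟩ := hy
          rcases List.mem_cons.mp hmemi with hcase | hcase
          · -- occurrence in column j
            obtain ⟨r, hrh, hrc, hrq⟩ := hmodj i hcase hgd hiL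
            have hle : m0 ≤ r := by
              by_contra hlt
              exact hm0first r (by omega) hrc
            rw [posInP, if_pos hcase] at hval
            omega
          · -- occurrence in a later column: at least h j away
            have hne : i % k ≠ j := fun he => hjt (he ▸ hcase)
            rw [posInP, if_neg hne] at hval
            simp only [hh, hL] at hval hm0h ⊢
            have hny : hgt base.length k j ≤ y :=
              hval ▸ le_trans (Nat.le_add_right _ _) (Nat.le_add_right _ _)
            exact le_trans (Nat.le_of_lt hm0h) hny
    · -- c not in the first column: everything shifts by h j
      rw [index?_append_of_not_mem _ _ _ hc, ih hnd.of_cons (fun a ha => hmem a (List.mem_cons_of_mem _ ha))]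
      have hnocol : ∀ i, i < L → base.getD i ' ' = c → i % k ≠ j := by
        intro i hiL hgd he
        obtain ⟨r, hrh, hrc, _⟩ := hmodj i he hgd hiL
        exact hc (List.mem_map.mpr ⟨r, List.mem_range.mpr hrh, hrc⟩)
      cases hmt : PySem.List.min? ((List.range L).filterMap (fun i =>
          if base.getD i ' ' = c ∧ i % k ∈ t then some (posInP h t (i % k) + i / k) else none)) (fun x => x) with
      | none =>
        rw [PySem.List.min?_eq_none_iff] at hmt
        have h1 : (List.range L).filterMap (fun i =>
            if base.getD i ' ' = c ∧ i % k ∈ j :: t then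
              some (posInP h (j :: t) (i % k) + i / k) else none) = [] := by
          rw [List.filterMap_eq_nil_iff]
          intro i hi
          have hiL : i < L := List.mem_range.mp hi
          rw [if_neg]
          rintro ⟨hgd, hmemi⟩
          rcases List.mem_cons.mp hmemi with hcase | hcase
          · exact hnocol i hiL hgd hcase
          · have := List.filterMap_eq_nil_iff.mp hmt i hi
            rw [if_pos ⟨hgd, hcase⟩] at this
            exact Option.some_ne_none _ this
        rw [h1]
        rfl
      | some m =>
        have hlen : ((List.range (h j)).map g).length = h j := by simp
        rw [hlen]
        simp only [Option.map_some]
        symm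
        apply min?_id_eq_some
        · have hmem' := PySem.List.min?_mem hmt
          rw [mem_occ] at hmem'
          obtain ⟨i1, hiL, hgd, hmemi, hval⟩ := hmem'
          rw [mem_occ]
          refine ⟨i1, hiL, hgd, List.mem_cons_of_mem _ hmemi, ?_⟩
          have hne : i1 % k ≠ j := fun he => hjt (he ▸ hmemi)
          rw [posInP, if_neg hne]
          simp only [hh, hL] at hval ⊢
          omega
        · intro y hy
          rw [mem_occ] at hy
          obtain ⟨i, hiL, hgd, hmemi, hval⟩ := hy
          rcases List.mem_cons.mp hmemi with hcase | hcase
          · exact absurd hcase (hnocol i hiL hgd)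
          · have hne : i % k ≠ j := fun he => hjt (he ▸ hcase)
            rw [posInP, if_neg hne] at hval
            have hmem2 : posInP h t (i % k) + i / k ∈ (List.range L).filterMap (fun i =>
                if base.getD i ' ' = c ∧ i % k ∈ t then some (posInP h t (i % k) + i / k) else none) := by
              rw [mem_occ]
              exact ⟨i, hiL, hgd, hcase, rfl⟩
            have := PySem.List.min?_isMin hmt _ hmem2
            simp only [hh, hL] at this hval ⊢
            omega

theorem posIn_filter (h : Nat → Nat) (key : Nat → Char) :
    ∀ (cs : List Nat), cs.Pairwise (fun a b => key a < key b) → ∀ j ∈ cs,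
      posInP h cs j = ((cs.filter (fun a => decide (key a < key j))).map h).sum := by
  intro cs
  induction cs with
  | nil => intro _ j hj; cases hj
  | cons x t ih =>
    intro hp j hj
    have hxt : ∀ a ∈ t, key x < key a := fun a ha => (List.pairwise_cons.mp hp).1 a ha
    rcases List.mem_cons.mp hj with he | hjt
    · subst he
      rw [posInP, if_pos rfl]
      have h1 : (j :: t).filter (fun a => decide (key a < key j)) = [] := by
        rw [List.filter_eq_nil_iff]
        intro a ha
        rcases List.mem_cons.mp ha with he2 | hat
        · subst he2; simp
        · have := hxt a hat
          simpa using not_lt.mpr (le_of_lt this)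
      rw [h1]
      rfl
    · have hne : j ≠ x := by
        intro he
        have := hxt j hjt
        rw [he] at this
        exact lt_irrefl _ this
      rw [posInP, if_neg hne]
      have hxj : key x < key j := hxt j hjt
      rw [List.filter_cons_of_pos (by simpa using hxj), List.map_cons, List.sum_cons,
        ih (List.pairwise_cons.mp hp).2 j hjt]

theorem hidx_all (kw base : List Char) (hnd : kw.Nodup) (h0 : 0 < kw.length)
    (hkL : kw.length ≤ base.length) (c : Char) :
    PySem.List.index?
      ((PySem.List.sorted (List.range kw.length) (fun j => kw.getD j ' ') false).flatMap
        (fun j => (List.range ((base.length + kw.length - 1) / kw.length)).filterMap (fun r =>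
          if r * kw.length + j < base.length then base[r * kw.length + j]? else none)))
      c
    = PySem.List.min? ((List.range base.length).filterMap (fun i =>
        if base.getD i ' ' = c then
          some ((((List.range kw.length).map (fun j =>
            (((List.range kw.length).filter (fun j2 => kw.getD j2 ' ' < kw.getD j ' ')).map
              (fun j2 => ((List.range kw.length).map (fun j' => (base.length - j' + kw.length - 1) / kw.length)).getD j2 0)).sum)).getD (i % kw.length) 0) + i / kw.length)
        else none)) (fun x => x) := by
  have hCBperm := PySem.List.sorted_perm (List.range kw.length) (fun j => kw.getD j ' ') false
  have hmemCB : ∀ j ∈ PySem.List.sorted (List.range kw.length) (fun j => kw.getD j ' ') false,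
      j < kw.length := fun j hj => List.mem_range.mp (hCBperm.mem_iff.mp hj)
  have hCBnd : (PySem.List.sorted (List.range kw.length) (fun j => kw.getD j ' ') false).Nodup :=
    hCBperm.symm.nodup List.nodup_range
  have hCBle : (PySem.List.sorted (List.range kw.length) (fun j => kw.getD j ' ') false).Pairwise
      (fun a b => kw.getD a ' ' ≤ kw.getD b ' ') :=
    PySem.List.sorted_pairwise (List.range kw.length) (fun j => kw.getD j ' ')
  have hCBlt : (PySem.List.sorted (List.range kw.length) (fun j => kw.getD j ' ') false).Pairwise
      (fun a b => kw.getD a ' ' < kw.getD b ' ') := by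
    refine (hCBle.and hCBnd).imp_of_mem ?_
    intro a b ha hb hab
    rcases hab with ⟨hle, hne⟩
    rcases lt_or_eq_of_le hle with h | h
    · exact h
    · exfalso
      have ha' := hmemCB a ha
      have hb' := hmemCB b hb
      rw [List.getD_eq_getElem kw ' ' ha', List.getD_eq_getElem kw ' ' hb'] at h
      exact (fun hx => hx) hne ((hnd.getElem_inj_iff).mp h)
  -- rewrite each column into its map form
  have hcols : (PySem.List.sorted (List.range kw.length) (fun j => kw.getD j ' ') false).flatMap
      (fun j => (List.range ((base.length + kw.length - 1) / kw.length)).filterMap (fun r =>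
        if r * kw.length + j < base.length then base[r * kw.length + j]? else none))
      = (PySem.List.sorted (List.range kw.length) (fun j => kw.getD j ' ') false).flatMap
        (fun j => (List.range (hgt base.length kw.length j)).map
          (fun r => base.getD (r * kw.length + j) ' ')) := by
    apply List.flatMap_congr
    intro j hj
    exact colStr_eq base kw.length j h0 (hmemCB j hj) hkL
  rw [hcols, main_ind base kw.length h0 hkL c _ hCBnd hmemCB]
  congr 1
  apply List.filterMap_congr
  intro i hi
  have hik : i % kw.length < kw.length := Nat.mod_lt i h0
  have hmem : i % kw.length ∈ PySem.List.sorted (List.range kw.length) (fun j => kw.getD j ' ') false :=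
    hCBperm.mem_iff.mpr (List.mem_range.mpr hik)
  by_cases hgd : base.getD i ' ' = c
  · rw [if_pos ⟨hgd, hmem⟩, if_pos hgd]
    congr 2
    -- posInP = the offs entry
    rw [posIn_filter (hgt base.length kw.length) (fun a => kw.getD a ' ') _ hCBlt _ hmem]
    rw [PySem.List.getD_map_range _ _ _ _ hik]
    have hperm : ((PySem.List.sorted (List.range kw.length) (fun j => kw.getD j ' ') false).filter
        (fun a => decide (kw.getD a ' ' < kw.getD (i % kw.length) ' '))).Perm
        ((List.range kw.length).filter (fun a => decide (kw.getD a ' ' < kw.getD (i % kw.length) ' '))) :=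
      hCBperm.filter _
    rw [(hperm.map (hgt base.length kw.length)).sum_eq]
    apply congrArg List.sum
    apply List.map_congr_left
    intro j2 hj2
    have hj2k : j2 < kw.length := List.mem_range.mp (List.mem_of_mem_filter hj2)
    rw [PySem.List.getD_map_range _ _ _ _ hj2k]
    rfl
  · rw [if_neg (fun hx => hgd hx.1), if_neg hgd]

theorem checkPairs_eq (mixed base alpha : List Char) (k : Nat) (offs : List Nat)
    (hidx : ∀ c : Char, PySem.List.index? mixed c
      = PySem.List.min? ((List.range base.length).filterMap (fun i =>
          if base.getD i ' ' = c then some (offs.getD (i % k) 0 + i / k) else none)) (fun x => x)) :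
    ∀ l : List (Char × Char),
    (match checkPairsA mixed alpha l with | none => false | some b => b)
      = checkPairsB base k offs alpha l := by
  intro l
  induction l with
  | nil => rfl
  | cons cp rest ih =>
    obtain ⟨c, p⟩ := cp
    rw [checkPairsA]
    simp only [checkPairsB]
    rw [← hidx c]
    cases hic : PySem.List.index? mixed c with
    | none => rfl
    | some mp =>
      by_cases hmp : mp < alpha.length
      · have hsl : alpha[mp]? = some alpha[mp] := List.getElem?_eq_getElem hmp
        have hslmem : alpha[mp] ∈ alpha := List.getElem_mem hmp
        have hgetD : alpha.getD mp ' ' = alpha[mp] := List.getD_eq_getElem alpha ' ' hmp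
        cases hpp : PySem.List.index? alpha (PySem.Chars.upperChar p) with
        | none =>
          have hpu : PySem.Chars.upperChar p ∉ alpha := (PySem.List.index?_eq_none_iff _ _).mp hpp
          simp [PySem.List.pyGet?_natCast, hsl, hpu, Nat.not_le.mpr hmp]
        | some pp =>
          have hpu : PySem.Chars.upperChar p ∈ alpha := (PySem.List.index?_isSome_iff _ _).mp (by rw [hpp]; rfl)
          cases hsp : PySem.List.index? alpha alpha[mp] with
          | none => exact absurd ((PySem.List.index?_eq_none_iff _ _).mp hsp) (by simp [hslmem])
          | some sp =>
            simp only [PySem.List.pyGet?_natCast, hsl, hgetD, hsp, Option.getD_some,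
              List.contains_eq_mem, hpu, decide_true, Bool.not_true, Bool.false_eq_true, if_false]
            rw [if_neg (by omega : ¬ alpha.length ≤ mp)]
            by_cases h9 : 9 < PySem.Int.mod ((sp : Int) - (pp : Int)) (alpha.length : Int)
            · simp [h9]
            · simp only [if_neg h9]
              exact ih
      · have hnone : alpha[mp]? = none := List.getElem?_eq_none (by omega)
        simp [PySem.List.pyGet?_natCast, Nat.le_of_not_lt hmp]

theorem checkSegs_eq (mixed base alpha : List Char) (k : Nat) (offs : List Nat)
    (hidx : ∀ c : Char, PySem.List.index? mixed c
      = PySem.List.min? ((List.range base.length).filterMap (fun i =>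
          if base.getD i ' ' = c then some (offs.getD (i % k) 0 + i / k) else none)) (fun x => x)) :
    ∀ l : List (String × String × String),
    (match checkSegsA mixed alpha l with | none => false | some b => b)
      = checkSegsB base k offs alpha l := by
  intro l
  induction l with
  | nil => rfl
  | cons seg rest ih =>
    obtain ⟨t, cs, ps⟩ := seg
    rw [checkSegsA, checkSegsB]
    have hp := checkPairs_eq mixed base alpha k offs hidx (cs.toList.zip ps.toList)
    cases hA : checkPairsA mixed alpha (cs.toList.zip ps.toList) with
    | none => rw [hA] at hp; simp [← hp]
    | some b =>
      rw [hA] at hp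
      cases b with
      | false => simp [← hp]
      | true => simp [← hp, ih]

-- ===== VERDICT (by name: the statement is the Claim_ definition above) =====
theorem validate_keyword_spec : Claim_equal_validate_keyword := by
  intro keyword known_segments alphabet _
  show _ = _
  simp only [validate_keyword, validate_keyword_alt, cka_eq]
  by_cases h : (PySem.List.dedup (PySem.Chars.upper keyword.toList)).length = 0
  · simp only [if_pos h]
  · simp only [if_neg h]
    apply checkSegs_eq
    intro c
    exact hidx_all (PySem.List.dedup (PySem.Chars.upper keyword.toList)) _
      (PySem.List.nodup_dedup _) (Nat.pos_of_ne_zero h)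
      (by simp) c
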